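-- pv_equiv track=rewrite | github.com/UdeM-LBIT/superrec2 | superrec2/model/synteny.py | parse_synteny
-- ===== SOURCE A (Python) =====
-- from typing import Dict, List, Mapping, Sequence
--
-- Synteny = Sequence[str]
--
-- def parse_synteny(data: str) -> Synteny:
--     """
--     Parse a string representation of a synteny.
--
--     :param data: string to parse
--     :returns: parsed synteny
--     :example:
--     >>> parse_synteny("abcdef")
--     ["a", "b", "c", "d", "e", "f"]
--     >>> parse_synteny("(gene1)(gene2)xyz(gene3)")
--     ["gene1", "gene2", "x", "y", "z", "gene3"]
--     """
--     depth = 0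
--     escaped = False
--     item = ""
--     result = []
--
--     for char in data:
--         if not escaped and char == "\\":
--             escaped = True
--             continue
--
--         if depth == 0:
--             if escaped:
--                 result.append(char)
--             elif char == "(":
--                 depth += 1
--             elif not str.isspace(char):
--                 result.append(char)
--         else:
--             if escaped:
--                 item += char
--             elif char == "(":
--                 item += char
--                 depth += 1
--             elif char == ")":
--                 depth -= 1
--
--                 if depth == 0:
--                     result.append(item.strip())
--                     item = ""
--                 else:
--                     item += char
--             else:
--                 item += char
--
--         escaped = False
--
--     return result
-- ===== SOURCE B (Python) =====
-- def parse_synteny(data):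
--     """Index-based re-implementation: scan with an explicit cursor; on a
--     top-level '(' find its matching ')' in one inner scan (honouring escapes
--     and nesting), unescaping as it goes, then strip and emit the group."""
--     result = []
--     n = len(data)
--     i = 0
--     while i < n:
--         c = data[i]
--         if c == "\\":
--             if i + 1 < n:
--                 result.append(data[i + 1])
--             i += 2
--         elif c == "(":
--             inner = []
--             depth = 0
--             j = i + 1
--             closed = False
--             while j < n:
--                 d = data[j]
--                 if d == "\\":
--                     if j + 1 < n:
--                         inner.append(data[j + 1])
--                     j += 2
--                     continue
--                 if d == "(":
--                     depth += 1
--                 elif d == ")":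
--                     if depth == 0:
--                         closed = True
--                         break
--                     depth -= 1
--                 inner.append(d)
--                 j += 1
--             if not closed:
--                 break
--             result.append("".join(inner).strip())
--             i = j + 1
--         elif c.isspace():
--             i += 1
--         else:
--             result.append(c)
--             i += 1
--     return result
-- ===== Notes on version B (the rewrite author's own statement) =====
-- stated objective: alternative
-- what changed: Replaced A's single character-at-a-time state machine (depth/escaped/item flags threaded through one for-loop) by an explicit-cursor while loop that, at each top-level group opener, runs a separate inner scan to locate the matching closer (tracking nesting and escapes), emits the unescaped stripped group at once, and jumps the cursor past it.
import Mathlib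
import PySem

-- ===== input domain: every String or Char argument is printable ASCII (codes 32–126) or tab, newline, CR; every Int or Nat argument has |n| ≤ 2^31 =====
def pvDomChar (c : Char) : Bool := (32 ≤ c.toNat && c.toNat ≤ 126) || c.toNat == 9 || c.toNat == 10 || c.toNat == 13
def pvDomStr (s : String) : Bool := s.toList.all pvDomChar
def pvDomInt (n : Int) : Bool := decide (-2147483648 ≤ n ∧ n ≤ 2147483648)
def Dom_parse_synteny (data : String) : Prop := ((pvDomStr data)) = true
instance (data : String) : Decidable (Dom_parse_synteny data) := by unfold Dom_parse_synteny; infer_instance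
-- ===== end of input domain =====

-- B rewrites A's one-pass state machine as a cursor loop with an inner matching-paren scan per group; objective: alternative decomposition (same cost).

-- ===== PORT A =====
-- state = (depth, escaped, item, result), exactly A's loop variables
def pvStepA (st : Nat × Bool × String × List String) (c : Char) :
    Nat × Bool × String × List String :=
  let (depth, escaped, item, result) := st
  if !escaped && c = '\\' then (depth, true, item, result)
  else if depth = 0 then
    if escaped then (depth, false, item, result ++ [String.singleton c])
    else if c = '(' then (depth + 1, false, item, result)
    else if !(PySem.Chars.isspace c) then (depth, false, item, result ++ [String.singleton c])
    else (depth, false, item, result)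
  else
    if escaped then (depth, false, item.push c, result)
    else if c = '(' then (depth + 1, false, item.push c, result)
    else if c = ')' then
      if depth - 1 = 0 then (depth - 1, false, "", result ++ [PySem.Str.strip item])
      else (depth - 1, false, item.push c, result)
    else (depth, false, item.push c, result)

def parse_synteny (data : String) : List String :=
  (data.toList.foldl pvStepA (0, false, "", [])).2.2.2

-- ===== PORT B =====
-- inner scan of Source B: from just after a top-level '(' find the matching ')',
-- building the unescaped inner text; none = the group never closes (B breaks).
-- Structural recursion: an escape consumes the escaped character together with its backslash.
def pvScanGroup : List Char → Nat → String → Option (String × List Char)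
  | [], _, _ => none
  | '\\' :: [], _, _ => none
  | '\\' :: c2 :: rest2, d, inner => pvScanGroup rest2 d (inner.push c2)
  | c :: rest, d, inner =>
    if c = '(' then pvScanGroup rest (d + 1) (inner.push c)
    else if c = ')' then
      if d = 0 then some (inner, rest)
      else pvScanGroup rest (d - 1) (inner.push c)
    else pvScanGroup rest d (inner.push c)

-- the outer while loop of Source B, recursing on the remaining characters;
-- the fuel argument (length of the remaining input) only makes the recursion structural
def pvParseGo : Nat → List Char → List String
  | 0, _ => []
  | _ + 1, [] => []
  | n + 1, c :: rest =>
    if c = '\\' then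
      match rest with
      | [] => []
      | c2 :: rest2 => String.singleton c2 :: pvParseGo n rest2
    else if c = '(' then
      match pvScanGroup rest 0 "" with
      | none => []
      | some (inner, rest') => PySem.Str.strip inner :: pvParseGo n rest'
    else if PySem.Chars.isspace c then pvParseGo n rest
    else String.singleton c :: pvParseGo n rest

def pvParseB (cs : List Char) : List String := pvParseGo cs.length cs

def parse_synteny_alt (data : String) : List String := pvParseB data.toList

-- ===== PRECONDITION & SPEC =====
def Spec_parse_synteny (data : String) (out : List String) : Prop := out = parse_synteny_alt data
instance (data : String) (out : List String) : Decidable (Spec_parse_synteny data out) := by unfold Spec_parse_synteny; infer_instance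

-- ===== CLAIM (what is proved, stated in full; the proofs are below) =====
def Claim_equal_parse_synteny : Prop := ∀ (data : String), Dom_parse_synteny data → Spec_parse_synteny data (parse_synteny data)

-- ===== LEMMAS AND PROOFS =====

-- unfolding equations for pvScanGroup on a generic head character
theorem pvScanGroup_other (c : Char) (rest : List Char) (d : Nat) (inner : String)
    (h1 : c ≠ '\\') (h2 : c ≠ '(') (h3 : c ≠ ')') :
    pvScanGroup (c :: rest) d inner = pvScanGroup rest d (inner.push c) := by
  rw [pvScanGroup.eq_def]
  rcases rest with _ | ⟨c2, rest2⟩ <;> simp [h1, h2, h3]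

theorem pvScanGroup_open (rest : List Char) (d : Nat) (inner : String) :
    pvScanGroup ('(' :: rest) d inner = pvScanGroup rest (d + 1) (inner.push '(') := by
  rw [pvScanGroup.eq_def]
  rcases rest with _ | ⟨c2, rest2⟩ <;> simp

theorem pvScanGroup_close (rest : List Char) (d : Nat) (inner : String) :
    pvScanGroup (')' :: rest) d inner =
      if d = 0 then some (inner, rest) else pvScanGroup rest (d - 1) (inner.push ')') := by
  rw [pvScanGroup.eq_def]
  rcases rest with _ | ⟨c2, rest2⟩ <;> simp

-- the inner scan consumes characters
theorem pvScanGroup_some_length : ∀ (n : Nat) (cs : List Char), cs.length ≤ n →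
    ∀ (d : Nat) (inner : String) (a : String) (r : List Char),
    pvScanGroup cs d inner = some (a, r) → r.length < cs.length := by
  intro n
  induction n with
  | zero =>
    intro cs hcs d inner a r h
    match cs with
    | [] => simp [pvScanGroup] at h
    | _ :: _ => simp at hcs
  | succ n ih =>
    intro cs hcs d inner a r h
    match cs with
    | [] => simp [pvScanGroup] at h
    | c :: rest =>
      simp only [List.length_cons] at hcs
      by_cases h1 : c = '\\'
      · subst h1
        match rest with
        | [] => simp [pvScanGroup] at h
        | c2 :: rest2 =>
          rw [show pvScanGroup ('\\' :: c2 :: rest2) d inner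
              = pvScanGroup rest2 d (inner.push c2) from rfl] at h
          have := ih rest2 (by simp at hcs; omega) d (inner.push c2) a r h
          simp; omega
      · by_cases h2 : c = '('
        · subst h2
          rw [pvScanGroup_open] at h
          have := ih rest (by omega) (d + 1) (inner.push '(') a r h
          simp; omega
        · by_cases h3 : c = ')'
          · subst h3
            rw [pvScanGroup_close] at h
            by_cases hd : d = 0
            · rw [if_pos hd] at h
              simp only [Option.some.injEq, Prod.mk.injEq] at h
              simp [← h.2]
            · rw [if_neg hd] at h
              have := ih rest (by omega) (d - 1) (inner.push ')') a r h
              simp; omega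
          · rw [pvScanGroup_other c rest d inner h1 h2 h3] at h
            have := ih rest (by omega) d (inner.push c) a r h
            simp; omega

-- pvParseGo n [] is [] for every fuel
theorem pvParseGo_nil_any (n : Nat) : pvParseGo n [] = [] := by cases n <;> rfl

-- one-step unfolding of pvParseGo on a cons with positive fuel
theorem pvParseGo_cons (n : Nat) (c : Char) (rest : List Char) :
    pvParseGo (n + 1) (c :: rest) =
      (if c = '\\' then
        (match rest with
         | [] => []
         | c2 :: rest2 => String.singleton c2 :: pvParseGo n rest2)
      else if c = '(' then
        (match pvScanGroup rest 0 "" with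
         | none => []
         | some (inner, rest') => PySem.Str.strip inner :: pvParseGo n rest')
      else if PySem.Chars.isspace c then pvParseGo n rest
      else String.singleton c :: pvParseGo n rest) := by
  rcases rest with _ | ⟨c2, rest2⟩ <;> rw [pvParseGo]

-- with enough fuel (≥ the remaining length) pvParseGo does not depend on the fuel
theorem pvParseGo_irrel : ∀ (n : Nat) (cs : List Char), cs.length ≤ n → ∀ (m : Nat),
    cs.length ≤ m → pvParseGo n cs = pvParseGo m cs := by
  intro n
  induction n with
  | zero =>
    intro cs hcs m _
    match cs with
    | [] => rw [pvParseGo_nil_any, pvParseGo_nil_any]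
    | _ :: _ => simp at hcs
  | succ n ih =>
    intro cs hcs m hm
    match cs with
    | [] => rw [pvParseGo_nil_any, pvParseGo_nil_any]
    | c :: rest =>
      simp only [List.length_cons] at hcs hm
      match m, hm with
      | m + 1, hm =>
        rw [pvParseGo_cons, pvParseGo_cons]
        by_cases h1 : c = '\\'
        · rw [if_pos h1, if_pos h1]
          match rest with
          | [] => rfl
          | c2 :: rest2 =>
            simp only []
            rw [ih rest2 (by simp at hcs; omega) m (by simp at hm; omega)]
        · rw [if_neg h1, if_neg h1]
          by_cases h2 : c = '('
          · rw [if_pos h2, if_pos h2]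
            cases hx : pvScanGroup rest 0 "" with
            | none => rfl
            | some p =>
              obtain ⟨inner, rest'⟩ := p
              have hlt := pvScanGroup_some_length rest.length rest le_rfl 0 "" inner rest' hx
              simp only []
              rw [ih rest' (by omega) m (by omega)]
          · rw [if_neg h2, if_neg h2]
            by_cases h3 : PySem.Chars.isspace c
            · rw [if_pos h3, if_pos h3, ih rest (by omega) m (by omega)]
            · rw [if_neg h3, if_neg h3, ih rest (by omega) m (by omega)]

-- unfolding equations for pvParseB
theorem pvParseB_nil : pvParseB [] = [] := rfl

theorem pvParseB_esc_nil : pvParseB ['\\'] = [] := rfl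

theorem pvParseB_esc (c2 : Char) (rest2 : List Char) :
    pvParseB ('\\' :: c2 :: rest2) = String.singleton c2 :: pvParseB rest2 := by
  unfold pvParseB
  rw [show (('\\' :: c2 :: rest2).length) = rest2.length + 1 + 1 from by simp]
  rw [pvParseGo_cons, if_pos rfl]
  simp only []
  rw [pvParseGo_irrel (rest2.length + 1) rest2 (by omega) rest2.length le_rfl]

theorem pvParseB_group (rest : List Char) :
    pvParseB ('(' :: rest) =
      (match pvScanGroup rest 0 "" with
       | none => []
       | some (inner, rest') => PySem.Str.strip inner :: pvParseB rest') := by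
  unfold pvParseB
  rw [show (('(' :: rest).length) = rest.length + 1 from by simp]
  rw [pvParseGo_cons, if_neg (by decide), if_pos rfl]
  cases hx : pvScanGroup rest 0 "" with
  | none => rfl
  | some p =>
    obtain ⟨inner, rest'⟩ := p
    have hlt := pvScanGroup_some_length rest.length rest le_rfl 0 "" inner rest' hx
    simp only []
    rw [pvParseGo_irrel rest.length rest' (by omega) rest'.length le_rfl]

theorem pvParseB_char (c : Char) (rest : List Char) (h1 : c ≠ '\\') (h2 : c ≠ '(') :
    pvParseB (c :: rest) =
      if PySem.Chars.isspace c then pvParseB rest else String.singleton c :: pvParseB rest := by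
  unfold pvParseB
  rw [show ((c :: rest).length) = rest.length + 1 from by simp]
  rw [pvParseGo_cons, if_neg h1, if_neg h2]

-- main invariant: A's fold, started at top level, yields res ++ B's parse;
-- started inside a group at depth d+1 with partial item, it yields res ++ what B's
-- inner scan (at nesting d) followed by B's parse of the remainder produces.
theorem pv_loop_eq : ∀ (n : Nat) (cs : List Char), cs.length ≤ n →
    (∀ res : List String, (cs.foldl pvStepA (0, false, "", res)).2.2.2 = res ++ pvParseB cs) ∧
    (∀ (d : Nat) (item : String) (res : List String),
      (cs.foldl pvStepA (d + 1, false, item, res)).2.2.2 =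
        res ++ (match pvScanGroup cs d item with
                | some (a, r) => PySem.Str.strip a :: pvParseB r
                | none => [])) := by
  intro n
  induction n with
  | zero =>
    intro cs hcs
    match cs with
    | [] => simp [pvParseB_nil, pvScanGroup]
    | _ :: _ => simp at hcs
  | succ n ih =>
    intro cs hcs
    match cs with
    | [] => simp [pvParseB_nil, pvScanGroup]
    | c :: rest =>
      simp only [List.length_cons] at hcs
      constructor
      · intro res
        by_cases h1 : c = '\\'
        · subst h1
          rw [List.foldl_cons, show pvStepA (0, false, "", res) '\\' = (0, true, "", res) from by
            simp [pvStepA]]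
          match rest with
          | [] => simp [pvParseB_esc_nil]
          | c2 :: rest2 =>
            rw [List.foldl_cons, show pvStepA (0, true, "", res) c2
                = (0, false, "", res ++ [String.singleton c2]) from by simp [pvStepA]]
            rw [(ih rest2 (by simp at hcs; omega)).1 (res ++ [String.singleton c2])]
            rw [pvParseB_esc]; simp
        · by_cases h2 : c = '('
          · subst h2
            rw [List.foldl_cons, show pvStepA (0, false, "", res) '(' = (1, false, "", res) from by
              simp [pvStepA]]
            have := (ih rest (by omega)).2 0 "" res
            rw [this, pvParseB_group]
            cases hx : pvScanGroup rest 0 "" with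
            | none => simp
            | some p => simp
          · by_cases h3 : PySem.Chars.isspace c
            · rw [List.foldl_cons, show pvStepA (0, false, "", res) c = (0, false, "", res) from by
                simp [pvStepA, h1, h2, h3]]
              rw [(ih rest (by omega)).1 res, pvParseB_char c rest h1 h2]
              rw [if_pos h3]
            · rw [List.foldl_cons, show pvStepA (0, false, "", res) c
                  = (0, false, "", res ++ [String.singleton c]) from by simp [pvStepA, h1, h2, h3]]
              rw [(ih rest (by omega)).1 (res ++ [String.singleton c]), pvParseB_char c rest h1 h2]
              rw [if_neg h3]; simp
      · intro d item res
        by_cases h1 : c = '\\'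
        · subst h1
          rw [List.foldl_cons, show pvStepA (d + 1, false, item, res) '\\' = (d + 1, true, item, res)
            from by simp [pvStepA]]
          match rest with
          | [] => simp [pvScanGroup]
          | c2 :: rest2 =>
            rw [List.foldl_cons, show pvStepA (d + 1, true, item, res) c2
                = (d + 1, false, item.push c2, res) from by simp [pvStepA]]
            rw [(ih rest2 (by simp at hcs; omega)).2 d (item.push c2) res]
            rfl
        · by_cases h2 : c = '('
          · subst h2
            rw [List.foldl_cons, show pvStepA (d + 1, false, item, res) '('
                = (d + 2, false, item.push '(', res) from by simp [pvStepA]]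
            rw [(ih rest (by omega)).2 (d + 1) (item.push '(') res]
            rw [pvScanGroup_open]
          · by_cases h3 : c = ')'
            · subst h3
              by_cases hd : d = 0
              · subst hd
                rw [List.foldl_cons, show pvStepA (0 + 1, false, item, res) ')'
                    = (0, false, "", res ++ [PySem.Str.strip item]) from by simp [pvStepA]]
                rw [(ih rest (by omega)).1 (res ++ [PySem.Str.strip item])]
                rw [pvScanGroup_close, if_pos rfl]; simp
              · rw [List.foldl_cons, show pvStepA (d + 1, false, item, res) ')'
                    = ((d - 1) + 1, false, item.push ')', res) from by
                  simp [pvStepA, hd]; omega]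
                rw [(ih rest (by omega)).2 (d - 1) (item.push ')') res]
                rw [pvScanGroup_close, if_neg hd]
            · rw [List.foldl_cons, show pvStepA (d + 1, false, item, res) c
                  = (d + 1, false, item.push c, res) from by simp [pvStepA, h1, h2, h3]]
              rw [(ih rest (by omega)).2 d (item.push c) res]
              rw [pvScanGroup_other c rest d item h1 h2 h3]

-- ===== VERDICT (by name: the statement is the Claim_ definition above) =====
theorem parse_synteny_spec : Claim_equal_parse_synteny := by
  intro data _
  unfold Spec_parse_synteny parse_synteny parse_synteny_alt
  exact (pv_loop_eq data.toList.length data.toList le_rfl).1 []
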